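-- pv_equiv track=rewrite | github.com/aozp73/Algorithm-Programmers | kit/dynamic/N으로 표현.py | solution
-- ===== SOURCE A (Python) =====
-- from collections import defaultdict
--
-- def solution(N, number):
--
--     dp = defaultdict(set)
--
--     for i in range(1, 10):
--         dp[i].add(int(str(N) * i))
--
--         for j in range(1, i):
--             for left_num in dp[j]:
--                 for right_num in dp[i-j]:
--                     dp[i].add(left_num + right_num)
--                     dp[i].add(left_num - right_num)
--                     dp[i].add(left_num * right_num)
--                     if right_num != 0: dp[i].add(left_num // right_num)
--
--         if number in dp[i]: return i
--
--     return -1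
-- ===== SOURCE B (Python) =====
-- def solution(N, number):
--     # top-down memoized recursion over the number of copies, instead of A's bottom-up dp dict
--     cache = {}
--
--     def build(i):
--         if i not in cache:
--             vals = {int(str(N) * i)}
--             for j in range(1, i):
--                 left, right = build(j), build(i - j)
--                 for l in left:
--                     for r in right:
--                         for v in (l + r, l - r, l * r) + ((l // r,) if r != 0 else ()):
--                             vals.add(v)
--             cache[i] = vals
--         return cache[i]
--
--     for i in range(1, 10):
--         if number in build(i):
--             return i
--     return -1
-- ===== Notes on version B (the rewrite author's own statement) =====
-- stated objective: alternative
-- what changed: Replaces A's bottom-up defaultdict-of-sets loop with a top-down memoized recursion build(i) (cache dict) over the number of copies of N, with the driver scanning i = 1..9; the recurrence is the same but the control structure is recursive rather than iterative.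
import Mathlib
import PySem

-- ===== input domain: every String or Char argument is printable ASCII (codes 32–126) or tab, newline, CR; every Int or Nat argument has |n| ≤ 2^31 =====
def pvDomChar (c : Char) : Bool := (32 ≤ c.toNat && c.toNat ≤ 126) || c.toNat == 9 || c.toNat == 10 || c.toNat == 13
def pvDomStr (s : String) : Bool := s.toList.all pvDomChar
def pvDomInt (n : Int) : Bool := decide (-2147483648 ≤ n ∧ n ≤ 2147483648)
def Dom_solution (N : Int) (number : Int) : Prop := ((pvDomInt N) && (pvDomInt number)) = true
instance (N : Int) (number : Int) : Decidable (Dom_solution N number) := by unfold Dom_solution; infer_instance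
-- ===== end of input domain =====

-- B re-implements A as a top-down memoized recursion (cache dict + build(i)) instead of A's
-- bottom-up defaultdict loop; same recurrence, different control structure ('alternative').
-- Python's value sets are ported as Std.TreeSet Int (the reachable sets grow to tens of
-- thousands of elements, which PySem.Set's list representation cannot evaluate); every use is
-- order-independent (inserts, membership, building further sets), so this is exact.

-- ===== PORT A =====
-- int(str(N) * i); where Python's int() raises ValueError (N < 0 repeated), ofChars? is none —
-- those inputs are excluded by Pre_solution, and the .getD 0 value is never claimed about.
def pvRep (N : Int) (i : Int) : Int :=
  (PySem.Int.ofChars? (PySem.List.pyRepeat (PySem.Int.toChars N) i)).getD 0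

-- the body of A's outer loop for index i: dp[i].add(int(str(N)*i)) then the j/left/right loops
def solutionStep (N : Int) (dp : PySem.Dict Int (Std.TreeSet Int)) (i : Int) : Std.TreeSet Int :=
  let s0 := (dp.getD i ∅).insert (pvRep N i)
  (PySem.List.pyRange 1 i 1).foldl (fun s j =>
    (dp.getD j ∅).toList.foldl (fun s l =>
      (dp.getD (i - j) ∅).toList.foldl (fun s r =>
        let s := s.insert (l + r)
        let s := s.insert (l - r)
        let s := s.insert (l * r)
        if r ≠ 0 then s.insert (PySem.Int.floordiv l r) else s) s) s) s0

-- 'for i in range(1, 10): … if number in dp[i]: return i' with the mutable dp threaded through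
def solutionGo (N : Int) (number : Int) (dp : PySem.Dict Int (Std.TreeSet Int)) :
    List Int → Int
  | [] => -1
  | i :: rest =>
    let s := solutionStep N dp i
    if s.contains number then i
    else solutionGo N number (dp.insert i s) rest

def solution (N : Int) (number : Int) : Int :=
  solutionGo N number PySem.Dict.empty (PySem.List.pyRange 1 10 1)

-- ===== PORT B =====
-- Source B's build(i) with its cache dict; the mutable cache is threaded through explicitly
def buildMemo (N : Int) (cache : PySem.Dict Int (Std.TreeSet Int)) (i : Nat) :
    Std.TreeSet Int × PySem.Dict Int (Std.TreeSet Int) :=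
  if cache.contains (i : Int) then (cache.getD (i : Int) ∅, cache)
  else
    let vc :=
      (List.range' 1 (i - 1)).attach.foldl
        (fun (vc : Std.TreeSet Int × PySem.Dict Int (Std.TreeSet Int)) jh =>
          let lc := buildMemo N vc.2 jh.1
          let rc := buildMemo N lc.2 (i - jh.1)
          (lc.1.toList.foldl (fun vals l =>
              rc.1.toList.foldl (fun vals r =>
                ((l + r) :: (l - r) :: (l * r) ::
                  (if r ≠ 0 then [PySem.Int.floordiv l r] else [])).foldl Std.TreeSet.insert
                  vals)
              vals)
            vc.1,
           rc.2))
        ((∅ : Std.TreeSet Int).insert (pvRep N (i : Int)), cache)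
    (vc.1, vc.2.insert (i : Int) vc.1)
termination_by i
decreasing_by
  all_goals
    have h := jh.2
    rw [List.mem_range'] at h
    omega

def altGo (N : Int) (number : Int) (cache : PySem.Dict Int (Std.TreeSet Int)) :
    List Nat → Int
  | [] => -1
  | i :: rest =>
    let sc := buildMemo N cache i
    if sc.1.contains number then (i : Int)
    else altGo N number sc.2 rest

def solution_alt (N : Int) (number : Int) : Int :=
  altGo N number PySem.Dict.empty (List.range' 1 9)

-- ===== PRECONDITION & SPEC =====
-- Pre_ excludes exactly the inputs where A raises ValueError: N < 0 (so int(str(N)*i) fails for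
-- i ≥ 2) unless number = N, in which case A returns 1 before reaching i = 2.
def Pre_solution (N : Int) (number : Int) : Prop := 0 ≤ N ∨ number = N
instance (N : Int) (number : Int) : Decidable (Pre_solution N number) := by
  unfold Pre_solution; infer_instance

def pvWitness_solution : Int × Int := (5, 12)

def Spec_solution (N : Int) (number : Int) (out : Int) : Prop := out = solution_alt N number
instance (N : Int) (number : Int) (out : Int) : Decidable (Spec_solution N number out) := by
  unfold Spec_solution; infer_instance

-- ===== CLAIM (what is proved, stated in full; the proofs are below) =====
def Claim_equal_solution : Prop := ∀ (N : Int) (number : Int), Dom_solution N number → Pre_solution N number → Spec_solution N number (solution N number)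

-- ===== LEMMAS AND PROOFS =====

-- pure reference recursion: the set of values expressible with i copies of N
def pvRow (N : Int) (i : Nat) : Std.TreeSet Int :=
  (List.range' 1 (i - 1)).attach.foldl
    (fun vals jh =>
      (pvRow N jh.1).toList.foldl (fun vals l =>
        (pvRow N (i - jh.1)).toList.foldl (fun vals r =>
          ((l + r) :: (l - r) :: (l * r) ::
            (if r ≠ 0 then [PySem.Int.floordiv l r] else [])).foldl Std.TreeSet.insert vals)
        vals)
      vals)
    ((∅ : Std.TreeSet Int).insert (pvRep N (i : Int)))
termination_by i
decreasing_by
  all_goals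
    have h := jh.2
    rw [List.mem_range'] at h
    omega

-- pure reference driver
def pvGo (N : Int) (number : Int) : List Nat → Int
  | [] => -1
  | i :: rest =>
    if (pvRow N i).contains number then (i : Int)
    else pvGo N number rest

-- the invariant carried through A's loop: dp holds exactly rows 1..k, agreeing with pvRow
def pvInv (N : Int) (dp : PySem.Dict Int (Std.TreeSet Int)) (k : Nat) : Prop :=
  ∀ j : Int, dp.getD j ∅ =
    if 1 ≤ j ∧ j ≤ (k : Int) then pvRow N j.toNat else ∅

-- the invariant of B's cache: every present key holds its pvRow row
def pvCacheOK (N : Int) (c : PySem.Dict Int (Std.TreeSet Int)) : Prop :=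
  ∀ j : Int, c.contains j = true → c.getD j ∅ = pvRow N j.toNat

-- the innermost Python bodies agree: A's four add statements = B's fold over the candidate list
lemma adds_eq (vals : Std.TreeSet Int) (l r : Int) :
    ((l + r) :: (l - r) :: (l * r) ::
        (if r ≠ 0 then [PySem.Int.floordiv l r] else [])).foldl Std.TreeSet.insert vals =
      (let s := vals.insert (l + r);
       let s := s.insert (l - r);
       let s := s.insert (l * r);
       if r ≠ 0 then s.insert (PySem.Int.floordiv l r) else s) := by
  by_cases h : r = 0 <;> simp [List.foldl, h]

lemma step_eq (N : Int) (k : Nat) (dp : PySem.Dict Int (Std.TreeSet Int))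
    (hinv : pvInv N dp k) :
    solutionStep N dp ((k : Int) + 1) = pvRow N (k + 1) := by
  rw [solutionStep, pvRow]
  have h0 : dp.getD ((k : Int) + 1) ∅ = ∅ := by
    rw [hinv, if_neg]; omega
  rw [h0]
  have hbase : (∅ : Std.TreeSet Int).insert (pvRep N ((k : Int) + 1)) =
      (∅ : Std.TreeSet Int).insert (pvRep N ((k + 1 : Nat) : Int)) := by
    push_cast
    rfl
  rw [hbase]
  rw [show (List.range' 1 (k + 1 - 1)) = List.range' 1 k from rfl]
  rw [List.foldl_attach (l := List.range' 1 k)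
    (f := fun vals j =>
      (pvRow N j).toList.foldl (fun vals l =>
        (pvRow N (k + 1 - j)).toList.foldl (fun vals r =>
          ((l + r) :: (l - r) :: (l * r) ::
            (if r ≠ 0 then [PySem.Int.floordiv l r] else [])).foldl Std.TreeSet.insert vals)
        vals)
      vals)]
  rw [PySem.List.pyRange_one]
  have hcast : ((k : Int) + 1 - 1).toNat = k := by omega
  rw [hcast, List.range'_eq_map_range, List.foldl_map, List.foldl_map]
  apply PySem.List.foldl_congr_mem
  intro vals t ht
  rw [List.mem_range] at ht
  have e1 : (1 + (t : Int)).toNat = 1 + t := by omega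
  have e2 : ((k : Int) + 1 - (1 + (t : Int))).toNat = k + 1 - (1 + t) := by omega
  have hj : dp.getD (1 + (t : Int)) ∅ = pvRow N (1 + t) := by
    rw [hinv, if_pos (by omega), e1]
  have hij : dp.getD ((k : Int) + 1 - (1 + (t : Int))) ∅ = pvRow N (k + 1 - (1 + t)) := by
    rw [hinv, if_pos (by omega), e2]
  rw [hj, hij]
  apply PySem.List.foldl_congr_mem
  intro s l _
  apply PySem.List.foldl_congr_mem
  intro s r _
  rw [adds_eq]

lemma go_eq (N number : Int) : ∀ (n k : Nat) (dp : PySem.Dict Int (Std.TreeSet Int)),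
    k + n = 9 → pvInv N dp k →
    solutionGo N number dp (PySem.List.pyRange ((k : Int) + 1) 10 1) =
      pvGo N number (List.range' (k + 1) n) := by
  intro n
  induction n with
  | zero =>
    intro k dp hk _
    have h9 : k = 9 := by omega
    subst h9
    rw [PySem.List.pyRange_one_eq_nil (by norm_num)]
    simp [solutionGo, pvGo]
  | succ n ih =>
    intro k dp hk hinv
    rw [PySem.List.pyRange_one_cons (by omega)]
    rw [show List.range' (k + 1) (n + 1) = (k + 1) :: List.range' (k + 1 + 1) n from rfl]
    rw [solutionGo, pvGo]
    rw [step_eq N k dp hinv]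
    by_cases hmem : (pvRow N (k + 1)).contains number = true
    · simp only [hmem, if_true]
      push_cast
      ring
    · simp only [hmem, Bool.false_eq_true, if_false]
      have hnext : ((k : Int) + 1) + 1 = ((k + 1 : Nat) : Int) + 1 := by push_cast; ring
      rw [hnext]
      apply ih (k + 1) _ (by omega)
      intro j
      rw [PySem.Dict.getD_insert]
      by_cases hj : j = (k : Int) + 1
      · subst hj
        rw [if_pos rfl, if_pos (by constructor <;> omega)]
        norm_num
      · rw [if_neg hj, hinv j]
        have : (1 ≤ j ∧ j ≤ (k : Int)) ↔ (1 ≤ j ∧ j ≤ ((k + 1 : Nat) : Int)) := by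
          constructor <;> intro ⟨h1, h2⟩ <;> refine ⟨h1, ?_⟩ <;> push_cast at * <;> omega
        by_cases hc : 1 ≤ j ∧ j ≤ (k : Int)
        · rw [if_pos hc, if_pos (this.mp hc)]
        · rw [if_neg hc, if_neg (fun h => hc (this.mpr h))]

lemma cacheOK_insert (N : Int) (c : PySem.Dict Int (Std.TreeSet Int)) (i : Nat)
    (hc : pvCacheOK N c) : pvCacheOK N (c.insert (i : Int) (pvRow N i)) := by
  intro j hj
  rw [PySem.Dict.getD_insert]
  by_cases h : j = (i : Int)
  · subst h
    rw [if_pos rfl]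
    norm_num
  · rw [if_neg h]
    apply hc
    rw [PySem.Dict.contains_insert] at hj
    simpa [h] using hj

lemma buildMemo_correct (N : Int) : ∀ (i : Nat) (c : PySem.Dict Int (Std.TreeSet Int)),
    pvCacheOK N c →
    (buildMemo N c i).1 = pvRow N i ∧ pvCacheOK N (buildMemo N c i).2 := by
  intro i
  induction i using Nat.strong_induction_on with
  | _ i IH =>
    intro c hc
    rw [buildMemo]
    by_cases hcon : c.contains (i : Int) = true
    · have := hc (i : Int) hcon
      simp only [hcon, if_true]
      norm_num at this
      exact ⟨this, hc⟩
    · simp only [hcon, if_false, Bool.false_eq_true]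
      have hfold : ∀ (L : List {x // x ∈ List.range' 1 (i - 1)})
          (vals : Std.TreeSet Int) (c0 : PySem.Dict Int (Std.TreeSet Int)), pvCacheOK N c0 →
          (L.foldl
            (fun (vc : Std.TreeSet Int × PySem.Dict Int (Std.TreeSet Int)) jh =>
              let lc := buildMemo N vc.2 jh.1
              let rc := buildMemo N lc.2 (i - jh.1)
              (lc.1.toList.foldl (fun vals l =>
                  rc.1.toList.foldl (fun vals r =>
                    ((l + r) :: (l - r) :: (l * r) ::
                      (if r ≠ 0 then [PySem.Int.floordiv l r] else [])).foldl
                      Std.TreeSet.insert vals)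
                  vals)
                vc.1,
               rc.2))
            (vals, c0)).1 =
            L.foldl
              (fun vals jh =>
                (pvRow N jh.1).toList.foldl (fun vals l =>
                  (pvRow N (i - jh.1)).toList.foldl (fun vals r =>
                    ((l + r) :: (l - r) :: (l * r) ::
                      (if r ≠ 0 then [PySem.Int.floordiv l r] else [])).foldl
                      Std.TreeSet.insert vals)
                  vals)
                vals)
              vals ∧
            pvCacheOK N (L.foldl
              (fun (vc : Std.TreeSet Int × PySem.Dict Int (Std.TreeSet Int)) jh =>
                let lc := buildMemo N vc.2 jh.1
                let rc := buildMemo N lc.2 (i - jh.1)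
                (lc.1.toList.foldl (fun vals l =>
                    rc.1.toList.foldl (fun vals r =>
                      ((l + r) :: (l - r) :: (l * r) ::
                        (if r ≠ 0 then [PySem.Int.floordiv l r] else [])).foldl
                        Std.TreeSet.insert vals)
                    vals)
                  vc.1,
                 rc.2))
              (vals, c0)).2 := by
        intro L
        induction L with
        | nil => intro vals c0 hc0; exact ⟨rfl, hc0⟩
        | cons jh rest ihL =>
          intro vals c0 hc0
          have hmem := jh.2
          rw [List.mem_range'] at hmem
          have hjlt : jh.1 < i := by omega
          have hijlt : i - jh.1 < i := by omega
          obtain ⟨hl1, hl2⟩ := IH jh.1 hjlt c0 hc0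
          obtain ⟨hr1, hr2⟩ := IH (i - jh.1) hijlt _ hl2
          simp only [List.foldl_cons]
          rw [hl1, hr1]
          exact ihL _ _ hr2
      obtain ⟨h1, h2⟩ := hfold (List.range' 1 (i - 1)).attach
        ((∅ : Std.TreeSet Int).insert (pvRep N (i : Int))) c hc
      have hv := h1.trans (pvRow.eq_def N i).symm
      refine ⟨?_, ?_⟩
      · simpa using hv
      · simp only [hv]
        exact cacheOK_insert N _ i h2

lemma altGo_eq (N number : Int) : ∀ (L : List Nat) (c : PySem.Dict Int (Std.TreeSet Int)),
    pvCacheOK N c → altGo N number c L = pvGo N number L := by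
  intro L
  induction L with
  | nil => intro c _; rfl
  | cons i rest ih =>
    intro c hc
    obtain ⟨h1, h2⟩ := buildMemo_correct N i c hc
    rw [altGo, pvGo, h1]
    by_cases hmem : (pvRow N i).contains number = true
    · simp [hmem]
    · simp only [hmem, Bool.false_eq_true, if_false]
      exact ih _ h2

-- ===== VERDICT (by name: the statement is the Claim_ definition above) =====
theorem solution_spec : Claim_equal_solution := by
  intro N number _ _
  unfold Spec_solution solution solution_alt
  have hA := go_eq N number 9 0 PySem.Dict.empty (by omega)
    (by intro j; simp [PySem.Dict.getD_empty]; intro h1 h2; omega)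
  have hB := altGo_eq N number (List.range' 1 9) PySem.Dict.empty
    (by intro j hj; simp [PySem.Dict.contains_empty] at hj)
  simp only [Nat.cast_zero, zero_add] at hA
  rw [hA, hB]
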